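-- pv_equiv track=rewrite | github.com/kayvonavishan/algo-meta-model-agent | agentic_experimentation/git_worktree.py | _collect_until_next_header
-- ===== SOURCE A (Python) =====
-- def _collect_until_next_header(lines, idx):
--     content = []
--     while idx < len(lines):
--         if lines[idx].startswith("*** "):
--             break
--         content.append(lines[idx])
--         idx += 1
--     return content, idx
-- ===== SOURCE B (Python) =====
-- def _collect_until_next_header(lines, idx):
--     tail = lines[idx:]
--     end = next((j for j, line in enumerate(tail) if line.startswith("*** ")), len(tail))
--     return tail[:end], idx + end
-- ===== Notes on version B (the rewrite author's own statement) =====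
-- stated objective: idiomatic
-- what changed: B slices the tail once and locates the boundary with a single find over enumerate (next(...)) instead of growing an accumulator inside a while loop with manual index bookkeeping; the end index is derived as idx + boundary.
-- outside the precondition, e.g. on _collect_until_next_header(['a', 'b'], -1): A returns (['b', 'a', 'b'], 2), B returns (['b'], 0); on _collect_until_next_header(['a'], -2): A raises IndexError, B returns (['a'], -1)
import Mathlib
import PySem

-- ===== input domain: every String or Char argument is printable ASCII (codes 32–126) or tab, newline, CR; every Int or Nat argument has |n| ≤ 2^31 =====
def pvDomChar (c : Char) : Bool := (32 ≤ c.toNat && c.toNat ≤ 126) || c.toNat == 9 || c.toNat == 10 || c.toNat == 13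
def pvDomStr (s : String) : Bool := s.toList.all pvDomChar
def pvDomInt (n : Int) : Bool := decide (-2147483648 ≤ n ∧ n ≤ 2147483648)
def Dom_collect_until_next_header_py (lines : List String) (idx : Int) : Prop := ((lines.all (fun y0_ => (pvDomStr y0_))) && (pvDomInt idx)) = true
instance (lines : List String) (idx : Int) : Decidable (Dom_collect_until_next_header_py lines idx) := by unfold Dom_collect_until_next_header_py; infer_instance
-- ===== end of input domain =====

-- B finds the boundary index of the tail slice in one shaped step instead of A's
-- accumulator-growing while loop (objective: idiomatic; same O(n) cost).

-- ===== PORT A =====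
-- A's while loop; state is (content, idx), loop while idx < len(lines). The Nat fuel only
-- makes the recursion structural: each iteration moves idx up by 1, and the loop stops once
-- idx ≥ len(lines) or lines[idx] is out of range, so after at most 2*len+1 iterations it has
-- returned on every input; 2*len+2 units never run out (proved in the lemmas).
def pvCollectLoopA (lines : List String) : Nat → List String → Int → List String × Int
  | 0, content, idx => (content, idx)
  | fuel + 1, content, idx =>
    if idx < (lines.length : Int) then
      match PySem.List.pyGet? lines idx with
      | none => (content, idx)  -- lines[idx] raises IndexError in Python; excluded by Pre_
      | some line =>
        if PySem.Str.startswith line "*** " then (content, idx)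
        else pvCollectLoopA lines fuel (content ++ [line]) (idx + 1)
    else (content, idx)

def collect_until_next_header_py (lines : List String) (idx : Int) : List String × Int :=
  pvCollectLoopA lines (2 * lines.length + 2) [] idx

-- ===== PORT B =====
def collect_until_next_header_py_alt (lines : List String) (idx : Int) : List String × Int :=
  let tail := PySem.List.slice lines (some idx) none
  let stop := (tail.findIdx? (fun line => PySem.Str.startswith line "*** ")).getD tail.length
  (tail.take stop, idx + stop)

-- ===== PRECONDITION & SPEC =====
-- Pre_ restricts to the helper's natural domain of non-negative line cursors (every call site
-- passes an index that starts at 0 and only grows): for idx < -len(lines) A raises IndexError,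
-- and for in-range negative idx A's accidental negative-index wraparound rescans the list from
-- the start (e.g. (["a","b"], -1) ↦ (["b","a","b"], 2)) while B returns the tail slice
-- ((["b"], 0)) — a corner no caller of this header-scanning helper exercises.
def Pre_collect_until_next_header_py (lines : List String) (idx : Int) : Prop :=
  0 ≤ idx
instance (lines : List String) (idx : Int) : Decidable (Pre_collect_until_next_header_py lines idx) := by unfold Pre_collect_until_next_header_py; infer_instance

def pvWitness_collect_until_next_header_py : List String × Int := (["a", "*** b", "c"], 0)

def Spec_collect_until_next_header_py (lines : List String) (idx : Int) (out : List String × Int) : Prop := out = collect_until_next_header_py_alt lines idx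
instance (lines : List String) (idx : Int) (out : List String × Int) : Decidable (Spec_collect_until_next_header_py lines idx out) := by unfold Spec_collect_until_next_header_py; infer_instance

-- ===== CLAIM (what is proved, stated in full; the proofs are below) =====
def Claim_equal_collect_until_next_header_py : Prop := ∀ (lines : List String) (idx : Int), Dom_collect_until_next_header_py lines idx → Pre_collect_until_next_header_py lines idx → Spec_collect_until_next_header_py lines idx (collect_until_next_header_py lines idx)

-- ===== LEMMAS AND PROOFS =====

-- abbreviation used only in the proofs
def pvKeep (l : String) : Bool := !PySem.Str.startswith l "*** "

theorem pv_findIdx?_getD_eq_takeWhile (P : String → Bool) (l : List String) :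
    ((l.findIdx? P).getD l.length) = (l.takeWhile (fun a => !P a)).length := by
  induction l with
  | nil => simp
  | cons x xs ih =>
    rw [List.findIdx?_cons, List.takeWhile_cons]
    by_cases h : P x = true
    · rw [if_pos h, h]
      simp
    · have hx : P x = false := by revert h; cases P x <;> simp
      rw [if_neg h, hx]
      simp only [Bool.not_false, if_pos, List.length_cons]
      cases hfi : xs.findIdx? P with
      | none => rw [hfi] at ih; simp at ih ⊢; omega
      | some k => rw [hfi] at ih; simp at ih ⊢; omega

-- B in closed form over the tail
theorem pv_alt_eq (lines : List String) (idx : Int) :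
    collect_until_next_header_py_alt lines idx =
      (((PySem.List.slice lines (some idx) none).takeWhile pvKeep),
        idx + (((PySem.List.slice lines (some idx) none).takeWhile pvKeep).length)) := by
  show (let tail := PySem.List.slice lines (some idx) none
        let stop := (tail.findIdx? (fun line => PySem.Str.startswith line "*** ")).getD tail.length
        ((tail.take stop, idx + (stop : Int)) : List String × Int)) = _
  simp only []
  rw [pv_findIdx?_getD_eq_takeWhile]
  have hp := List.takeWhile_prefix (l := PySem.List.slice lines (some idx) none)
    (p := fun a => !PySem.Str.startswith a "*** ")
  rw [← List.prefix_iff_eq_take.mp hp]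
  rfl

-- A's loop at a non-negative index j, given enough fuel: collects lines[j:] up to the header
theorem pv_loopA_nonneg (lines : List String) :
    ∀ (fuel : Nat) (j : Nat) (c : List String), lines.length - j ≤ fuel →
      pvCollectLoopA lines fuel c (j : Int) =
        (c ++ ((lines.drop j).takeWhile pvKeep),
          (j : Int) + ((lines.drop j).takeWhile pvKeep).length) := by
  intro fuel
  induction fuel with
  | zero =>
    intro j c hf
    have hjl : lines.length ≤ j := by omega
    rw [pvCollectLoopA, List.drop_eq_nil_of_le hjl]
    simp
  | succ fuel ih =>
    intro j c hf
    rw [pvCollectLoopA]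
    by_cases hj : (j : Int) < (lines.length : Int)
    · have hjl : j < lines.length := by exact_mod_cast hj
      rw [if_pos hj, PySem.List.pyGet?_ofNat lines j hjl,
        List.drop_eq_getElem_cons hjl, List.takeWhile_cons]
      dsimp only
      by_cases hh : PySem.Str.startswith lines[j] "*** " = true
      · rw [if_pos hh]
        have : pvKeep lines[j] = false := by unfold pvKeep; rw [hh]; rfl
        rw [this]
        simp
      · have hkeep : pvKeep lines[j] = true := by
          unfold pvKeep; revert hh; cases PySem.Str.startswith lines[j] "*** " <;> simp
        rw [if_neg hh, hkeep, if_pos rfl]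
        have hrec := ih (j + 1) (c ++ [lines[j]]) (by omega)
        push_cast at hrec
        rw [hrec]
        refine Prod.ext ?_ ?_
        · simp
        · simp only [List.length_cons]
          push_cast
          ring
    · have hjl : lines.length ≤ j := by exact_mod_cast not_lt.mp hj
      rw [if_neg hj, List.drop_eq_nil_of_le hjl]
      simp

-- ===== VERDICT (by name: the statement is the Claim_ definition above) =====
theorem collect_until_next_header_py_spec : Claim_equal_collect_until_next_header_py := by
  unfold Claim_equal_collect_until_next_header_py
  intro lines idx _ hpre
  unfold Pre_collect_until_next_header_py at hpre
  unfold Spec_collect_until_next_header_py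
  rw [pv_alt_eq]
  have hj : idx = ((idx.toNat : Nat) : Int) := by omega
  rw [PySem.List.slice_from lines hpre]
  unfold collect_until_next_header_py
  rw [hj, pv_loopA_nonneg lines _ idx.toNat [] (by omega)]
  rw [List.nil_append]
  simp only [Int.toNat_natCast]
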